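-- pv_equiv track=rewrite | github.com/MrBrantCode/unitest_baseline | mut_generate/mist_train_taco/taco_19028/solution.py | minimum_members_for_bill_passage
-- ===== SOURCE A (Python) =====
-- def minimum_members_for_bill_passage(N, P, ballots):
--     # Calculate the score for each member based on the formula
--     scores = [(100 - P) * w + P * b for w, b in ballots]
--
--     # Sort the scores in descending order
--     scores.sort(reverse=True)
--
--     # Initialize the score required for the bill to pass
--     score = -sum(b for _, b in ballots) * P
--
--     # Count the minimum number of members needed to be in favor
--     cnt = 0
--     while score < 0:
--         score += scores[cnt]
--         cnt += 1
--
--     return cnt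
-- ===== SOURCE B (Python) =====
-- def minimum_members_for_bill_passage(N, P, ballots):
--     # Threshold the accumulated top scores must reach for the bill to pass.
--     thr = P * sum(b for _, b in ballots)
--     scores = sorted(((100 - P) * w + P * b for w, b in ballots), reverse=True)
--     # Running-max prefix-sum table: M[k] = best total achievable by some j <= k members.
--     M = [0]
--     run = 0
--     for s in scores:
--         run += s
--         M.append(max(M[-1], run))
--     # M is nondecreasing: binary-search the least k with M[k] >= thr.
--     lo, hi = 0, len(M)
--     while lo < hi:
--         mid = (lo + hi) // 2
--         if M[mid] < thr:
--             lo = mid + 1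
--         else:
--             hi = mid
--     return lo
-- ===== Notes on version B (the rewrite author's own statement) =====
-- stated objective: alternative
-- what changed: A's accumulate-while loop over the descending scores is replaced by building a running-max prefix-sum table M (M[k] = best total of some j<=k top members) and binary-searching it for the least count reaching the threshold P*sum(b).
import Mathlib
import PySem

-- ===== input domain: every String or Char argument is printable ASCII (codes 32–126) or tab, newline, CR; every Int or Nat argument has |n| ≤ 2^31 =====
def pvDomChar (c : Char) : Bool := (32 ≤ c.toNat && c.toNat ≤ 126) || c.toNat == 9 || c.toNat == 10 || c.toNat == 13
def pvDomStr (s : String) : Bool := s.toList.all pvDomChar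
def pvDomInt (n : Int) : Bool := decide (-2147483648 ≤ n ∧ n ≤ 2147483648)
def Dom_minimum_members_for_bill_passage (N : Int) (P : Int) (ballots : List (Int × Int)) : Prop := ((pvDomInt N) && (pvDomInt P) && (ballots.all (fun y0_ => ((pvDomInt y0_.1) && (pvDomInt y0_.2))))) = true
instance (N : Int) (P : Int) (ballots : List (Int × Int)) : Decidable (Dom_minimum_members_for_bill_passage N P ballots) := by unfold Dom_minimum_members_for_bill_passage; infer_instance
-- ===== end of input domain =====

-- B replaces A's accumulate-while loop over the sorted scores by a running-max prefix-sum
-- table plus a hand-written binary search (alternative decomposition; same asymptotic cost).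

-- ===== PORT A =====
-- the 'while score < 0: score += scores[cnt]; cnt += 1' loop; indexing scores[0], scores[1], …
-- in order is transcribed as consuming the list; the [] case is where Python raises IndexError
-- (excluded by Pre_), the value returned there is junk.
def pyAWhile (score : Int) (rest : List Int) (cnt : Int) : Int :=
  if score < 0 then
    match rest with
    | [] => cnt
    | s :: r => pyAWhile (score + s) r (cnt + 1)
  else cnt

def minimum_members_for_bill_passage (N : Int) (P : Int) (ballots : List (Int × Int)) : Int :=
  let scores := PySem.List.sorted (ballots.map (fun wb => (100 - P) * wb.1 + P * wb.2)) (fun x => x) true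
  let score := -(ballots.map (fun wb => wb.2)).sum * P
  pyAWhile score scores 0

-- ===== PORT B =====
-- midpoint bounds, needed for the binary search's termination
theorem pvMidBounds {lo hi : Int} (h : lo < hi) :
    lo ≤ PySem.Int.floordiv (lo + hi) 2 ∧ PySem.Int.floordiv (lo + hi) 2 < hi := by
  rw [PySem.Int.floordiv_eq_ediv_of_pos (by norm_num : (0:Int) < 2)]
  omega

-- the 'while lo < hi' binary search of Source B; pyGet? M mid is Python's M[mid]
-- (the none case is unreachable: 0 ≤ lo ≤ mid < hi ≤ len M at every call)
def pyBisect (M : List Int) (thr : Int) (lo hi : Int) : Int :=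
  if h : lo < hi then
    let mid := PySem.Int.floordiv (lo + hi) 2
    match PySem.List.pyGet? M mid with
    | none => lo
    | some v =>
      if v < thr then pyBisect M thr (mid + 1) hi else pyBisect M thr lo mid
  else lo
termination_by (hi - lo).toNat
decreasing_by
  · have := pvMidBounds h; omega
  · have := pvMidBounds h; omega

-- the M-building for-loop keeps M reversed (head = Python's M[-1]); M is never empty, so
-- List.headI is exactly M[-1]; M is re-reversed before the search.
def minimum_members_for_bill_passage_alt (N : Int) (P : Int) (ballots : List (Int × Int)) : Int :=
  let thr := P * (ballots.map (fun wb => wb.2)).sum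
  let scores := PySem.List.sorted (ballots.map (fun wb => (100 - P) * wb.1 + P * wb.2)) (fun x => x) true
  let Mrun := scores.foldl (fun (p : List Int × Int) s =>
      let run := p.2 + s
      ((max p.1.headI run) :: p.1, run)) ([0], 0)
  let M := Mrun.1.reverse
  pyBisect M thr 0 (M.length : Int)

-- ===== PRECONDITION & SPEC =====
-- Pre_ = exactly the inputs on which A's while loop stops before running off the end of
-- scores (Python A raises IndexError otherwise): the sum of the positive scores — the best
-- total any set of members can contribute — reaches the threshold P * sum(b).
def Pre_minimum_members_for_bill_passage (N : Int) (P : Int) (ballots : List (Int × Int)) : Prop :=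
  P * (ballots.map (fun wb => wb.2)).sum ≤
    (ballots.map (fun wb => max ((100 - P) * wb.1 + P * wb.2) 0)).sum
instance (N : Int) (P : Int) (ballots : List (Int × Int)) : Decidable (Pre_minimum_members_for_bill_passage N P ballots) := by unfold Pre_minimum_members_for_bill_passage; infer_instance

def pvWitness_minimum_members_for_bill_passage : Int × Int × (List (Int × Int)) := (2, 50, [(1, 1), (0, 1)])

def Spec_minimum_members_for_bill_passage (N : Int) (P : Int) (ballots : List (Int × Int)) (out : Int) : Prop := out = minimum_members_for_bill_passage_alt N P ballots
instance (N : Int) (P : Int) (ballots : List (Int × Int)) (out : Int) : Decidable (Spec_minimum_members_for_bill_passage N P ballots out) := by unfold Spec_minimum_members_for_bill_passage; infer_instance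

-- ===== CLAIM (what is proved, stated in full; the proofs are below) =====
def Claim_equal_minimum_members_for_bill_passage : Prop := ∀ (N : Int) (P : Int) (ballots : List (Int × Int)), Dom_minimum_members_for_bill_passage N P ballots → Pre_minimum_members_for_bill_passage N P ballots → Spec_minimum_members_for_bill_passage N P ballots (minimum_members_for_bill_passage N P ballots)

-- ===== LEMMAS AND PROOFS =====

-- The common yardstick: pvF thr s = how many leading elements of s the greedy accumulation
-- consumes before the running total reaches thr (= s.length if it never does).
def pvF (thr : Int) : List Int → Int
  | [] => 0
  | a :: r => if thr ≤ 0 then 0 else 1 + pvF (thr - a) r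

-- pvG b run s : the tail of B's running-max prefix table (b = best so far, run = prefix so far)
def pvG (b run : Int) : List Int → List Int
  | [] => []
  | a :: r => max b (run + a) :: pvG (max b (run + a)) (run + a) r

-- pvMaxPfx s = the largest prefix sum of s (including the empty prefix)
def pvMaxPfx : List Int → Int
  | [] => 0
  | a :: r => max 0 (a + pvMaxPfx r)

theorem pvF_nonpos (thr : Int) (s : List Int) (h : thr ≤ 0) : pvF thr s = 0 := by
  cases s <;> simp [pvF, h]

theorem pvAWhile_eq (s : List Int) : ∀ score cnt : Int, pyAWhile score s cnt = cnt + pvF (-score) s := by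
  induction s with
  | nil => intro score cnt; rw [pyAWhile]; split <;> simp [pvF]
  | cons a r ih =>
    intro score cnt
    rw [pyAWhile]
    by_cases h : score < 0
    · rw [if_pos h, ih]
      have hns : ¬ (-score ≤ 0) := by omega
      simp only [pvF, if_neg hns]
      have : -(score + a) = -score - a := by ring
      rw [this]; ring
    · rw [if_neg h]
      have hns : -score ≤ 0 := by omega
      simp [pvF, hns]

theorem pvG_ge (s : List Int) : ∀ b run : Int, ∀ x ∈ pvG b run s, b ≤ x := by
  induction s with
  | nil => intro b run x hx; simp [pvG] at hx
  | cons a r ih =>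
    intro b run x hx
    simp only [pvG, List.mem_cons] at hx
    rcases hx with rfl | hx
    · exact le_max_left _ _
    · exact le_trans (le_max_left _ _) (ih _ _ x hx)

theorem pvG_pairwise (s : List Int) : ∀ b run : Int, List.Pairwise (· ≤ ·) (b :: pvG b run s) := by
  induction s with
  | nil => intro b run; simp [pvG]
  | cons a r ih =>
    intro b run
    simp only [pvG]
    refine List.pairwise_cons.mpr ⟨?_, ih _ _⟩
    intro y hy
    rcases List.mem_cons.mp hy with rfl | hy
    · exact le_max_left _ _
    · exact le_trans (le_max_left _ _) (pvG_ge r _ _ y hy)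

-- B's for-loop produces exactly 0 :: pvG 0 0 s
theorem pvFold_eq (s : List Int) : ∀ (b run : Int) (acc : List Int),
    (s.foldl (fun (p : List Int × Int) x =>
      ((max p.1.headI (p.2 + x)) :: p.1, p.2 + x)) (b :: acc, run))
    = ((pvG b run s).reverse ++ (b :: acc), run + s.sum) := by
  induction s with
  | nil => intro b run acc; simp [pvG]
  | cons a r ih =>
    intro b run acc
    simp only [List.foldl_cons, List.headI_cons, pvG, List.sum_cons]
    rw [ih]
    simp only [List.reverse_cons, List.append_assoc, List.singleton_append]
    rw [add_assoc]

-- a monotone list all of whose first lo entries are < thr and whose entries from lo on are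
-- ≥ thr has exactly lo entries < thr
theorem pvCount_split (M : List Int) (thr : Int) (lo : Int) (h0 : 0 ≤ lo) (hlen : lo ≤ M.length)
    (hlt : ∀ i : Nat, (h : i < M.length) → (i : Int) < lo → M[i] < thr)
    (hge : ∀ i : Nat, (h : i < M.length) → lo ≤ (i : Int) → thr ≤ M[i]) :
    (M.countP (fun x => decide (x < thr)) : Int) = lo := by
  have hsplit : M = M.take lo.toNat ++ M.drop lo.toNat := (List.take_append_drop _ _).symm
  have hlo : lo.toNat ≤ M.length := by omega
  have h1 : (M.take lo.toNat).countP (fun x => decide (x < thr)) = (M.take lo.toNat).length := by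
    apply List.countP_eq_length.mpr
    intro x hx
    rcases List.mem_iff_getElem.mp hx with ⟨i, hi, rfl⟩
    rw [List.getElem_take]
    have hiM : i < M.length := by
      have := List.length_take_le lo.toNat M
      omega
    simp only [decide_eq_true_eq]
    exact hlt i hiM (by simp [List.length_take] at hi; omega)
  have h2 : (M.drop lo.toNat).countP (fun x => decide (x < thr)) = 0 := by
    apply List.countP_eq_zero.mpr
    intro x hx
    rcases List.mem_iff_getElem.mp hx with ⟨i, hi, rfl⟩
    rw [List.getElem_drop]
    have hiM : lo.toNat + i < M.length := by simp [List.length_drop] at hi; omega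
    simp only [decide_eq_true_eq, not_lt]
    exact hge _ hiM (by omega)
  calc (M.countP (fun x => decide (x < thr)) : Int)
      = (((M.take lo.toNat ++ M.drop lo.toNat).countP (fun x => decide (x < thr)) : Nat) : Int) := by
        rw [← hsplit]
    _ = lo := by
        rw [List.countP_append, h1, h2, List.length_take]
        omega

theorem pvBisect_eq (M : List Int) (thr : Int) (hM : List.Pairwise (· ≤ ·) M) :
    ∀ (k : Nat) (lo hi : Int), (hi - lo).toNat ≤ k → 0 ≤ lo → lo ≤ hi → hi ≤ M.length →
    (∀ i : Nat, (h : i < M.length) → (i : Int) < lo → M[i] < thr) →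
    (∀ i : Nat, (h : i < M.length) → hi ≤ (i : Int) → thr ≤ M[i]) →
    pyBisect M thr lo hi = (M.countP (fun x => decide (x < thr)) : Int) := by
  have hmono : ∀ (i j : Nat) (hi' : i < M.length) (hj' : j < M.length), i ≤ j → M[i] ≤ M[j] := by
    intro i j hi' hj' hij
    rcases Nat.lt_or_ge i j with h | h
    · exact List.pairwise_iff_getElem.mp hM i j hi' hj' h
    · have : i = j := by omega
      subst this; exact le_refl _
  intro k
  induction k with
  | zero =>
    intro lo hi hk h0 hlh hlen hlt hge
    have : lo = hi := by omega
    subst this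
    rw [pyBisect, dif_neg (lt_irrefl lo)]
    exact (pvCount_split M thr lo h0 (by omega) hlt (fun i h hi => hge i h hi)).symm
  | succ k ih =>
    intro lo hi hk h0 hlh hlen hlt hge
    by_cases h : lo < hi
    · have hmid := pvMidBounds h
      rw [pyBisect, dif_pos h]
      set mid := PySem.Int.floordiv (lo + hi) 2 with hmiddef
      have hmidnn : 0 ≤ mid := by omega
      have hmidlen : mid.toNat < M.length := by omega
      have hget : PySem.List.pyGet? M mid = some M[mid.toNat] :=
        calc PySem.List.pyGet? M mid
            = PySem.List.pyGet? M ((mid.toNat : Nat) : Int) := by rw [Int.toNat_of_nonneg hmidnn]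
          _ = M[mid.toNat]? := PySem.List.pyGet?_natCast M mid.toNat
          _ = some M[mid.toNat] := List.getElem?_eq_getElem hmidlen
      change (match PySem.List.pyGet? M mid with
        | none => lo
        | some v => if v < thr then pyBisect M thr (mid + 1) hi else pyBisect M thr lo mid) = _
      rw [hget]
      change (if M[mid.toNat] < thr then pyBisect M thr (mid + 1) hi else pyBisect M thr lo mid) = _
      by_cases hv : M[mid.toNat] < thr
      · rw [if_pos hv]
        apply ih (mid + 1) hi (by omega) (by omega) (by omega) hlen
        · intro i hi' hilt
          rcases Nat.lt_or_ge i lo.toNat with hc | hc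
          · exact hlt i hi' (by omega)
          · exact lt_of_le_of_lt (hmono i mid.toNat hi' hmidlen (by omega)) hv
        · exact hge
      · rw [if_neg hv]
        apply ih lo mid (by omega) h0 (by omega) (by omega) hlt
        intro i hi' hile
        exact le_trans (not_lt.mp hv) (hmono mid.toNat i hmidlen hi' (by omega))
    · have : lo = hi := by omega
      subst this
      rw [pyBisect, dif_neg (lt_irrefl lo)]
      exact (pvCount_split M thr lo h0 (by omega) hlt (fun i h hi => hge i h hi)).symm

-- the count of below-threshold entries in B's table equals A's greedy count
theorem pvG_count (s : List Int) : ∀ b run thr : Int, run ≤ b → b < thr →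
    thr ≤ max b (run + pvMaxPfx s) →
    ((pvG b run s).countP (fun x => decide (x < thr)) : Int) = pvF (thr - run) s - 1 := by
  induction s with
  | nil =>
    intro b run thr hrb hbt hcross
    simp only [pvMaxPfx, add_zero] at hcross
    omega
  | cons a r ih =>
    intro b run thr hrb hbt hcross
    have hrt : ¬ (thr - run ≤ 0) := by omega
    simp only [pvG, pvF, List.countP_cons, if_neg hrt]
    by_cases he : max b (run + a) < thr
    · have hcross' : thr ≤ max (max b (run + a)) (run + a + pvMaxPfx r) := by
        simp only [pvMaxPfx] at hcross
        omega
      have := ih (max b (run + a)) (run + a) thr (le_max_right _ _) he hcross'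
      simp only [decide_eq_true_eq, if_pos he]
      push_cast
      push_cast at this
      have harith : thr - run - a = thr - (run + a) := by ring
      rw [harith]
      omega
    · have hz : (pvG (max b (run + a)) (run + a) r).countP (fun x => decide (x < thr)) = 0 := by
        apply List.countP_eq_zero.mpr
        intro x hx
        have := pvG_ge r (max b (run + a)) (run + a) x hx
        simp only [decide_eq_true_eq, not_lt]
        omega
      have hra : thr - (run + a) ≤ 0 := by omega
      simp only [decide_eq_true_eq, if_neg he, hz]
      have harith : thr - run - a = thr - (run + a) := by ring
      rw [harith, pvF_nonpos _ r hra]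
      simp

theorem pvPosSum_nonneg (s : List Int) : 0 ≤ (s.map (fun x => max x 0)).sum := by
  induction s with
  | nil => simp
  | cons a r ih => simp only [List.map_cons, List.sum_cons]; omega

theorem pvPosSum_zero (s : List Int) (h : ∀ x ∈ s, x ≤ 0) : (s.map (fun x => max x 0)).sum = 0 := by
  induction s with
  | nil => simp
  | cons a r ih =>
    simp only [List.map_cons, List.sum_cons]
    have ha := h a (by simp)
    rw [ih (fun x hx => h x (List.mem_cons_of_mem a hx))]
    omega

-- on a descending list the largest prefix sum is the sum of the positive elements
theorem pvMaxPfx_sorted (s : List Int) (hs : List.Pairwise (fun a b => b ≤ a) s) :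
    pvMaxPfx s = (s.map (fun x => max x 0)).sum := by
  induction s with
  | nil => simp [pvMaxPfx]
  | cons a r ih =>
    rcases List.pairwise_cons.mp hs with ⟨hall, hr⟩
    simp only [pvMaxPfx, List.map_cons, List.sum_cons]
    rw [ih hr]
    by_cases ha : a ≤ 0
    · rw [pvPosSum_zero r (fun x hx => le_trans (hall x hx) ha)]
      omega
    · have := pvPosSum_nonneg r
      omega

theorem pvMain (N P : Int) (ballots : List (Int × Int))
    (hpre : Pre_minimum_members_for_bill_passage N P ballots) :
    minimum_members_for_bill_passage N P ballots = minimum_members_for_bill_passage_alt N P ballots := by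
  unfold Pre_minimum_members_for_bill_passage at hpre
  simp only [minimum_members_for_bill_passage, minimum_members_for_bill_passage_alt]
  set thr := P * (ballots.map (fun wb => wb.2)).sum with hthr
  set s := PySem.List.sorted (ballots.map (fun wb => (100 - P) * wb.1 + P * wb.2)) (fun x => x) true with hs
  -- A's loop is the greedy count pvF
  rw [pvAWhile_eq]
  have e1 : -(-(ballots.map (fun wb => wb.2)).sum * P) = thr := by rw [hthr]; ring
  rw [e1, zero_add]
  -- B's fold builds 0 :: pvG 0 0 s
  have hfold : (List.foldl (fun (p : List Int × Int) x =>
      ((max p.1.headI (p.2 + x)) :: p.1, p.2 + x)) ([0], 0) s)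
      = ((pvG 0 0 s).reverse ++ [0], 0 + s.sum) := pvFold_eq s 0 0 []
  have hM : ((List.foldl (fun (p : List Int × Int) x =>
      ((max p.1.headI (p.2 + x)) :: p.1, p.2 + x)) ([0], 0) s).1).reverse = 0 :: pvG 0 0 s := by
    rw [hfold]; simp
  rw [hM]
  -- B's binary search is the below-threshold count of the table
  have hb := pvBisect_eq (0 :: pvG 0 0 s) thr (pvG_pairwise s 0 0)
    ((0 :: pvG 0 0 s).length) 0 ((0 :: pvG 0 0 s).length : Int)
    (by omega) (le_refl 0) (by positivity) (le_refl _)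
    (by intro i h hi; omega)
    (by intro i h hi; exfalso; omega)
  rw [hb]
  -- the crossing fact from Pre_
  have hpos : pvMaxPfx s = (ballots.map (fun wb => max ((100 - P) * wb.1 + P * wb.2) 0)).sum := by
    rw [pvMaxPfx_sorted s (by simpa using PySem.List.sorted_pairwise_rev (ballots.map (fun wb => (100 - P) * wb.1 + P * wb.2)) (fun x => x))]
    rw [List.Perm.sum_eq ((PySem.List.sorted_perm (ballots.map (fun wb => (100 - P) * wb.1 + P * wb.2)) (fun x => x) true).map (fun x => max x 0))]
    simp only [List.map_map]
    rfl
  have hcross : thr ≤ max 0 (0 + pvMaxPfx s) := by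
    rw [hpos]; omega
  by_cases h0 : thr ≤ 0
  · -- threshold already met: both sides are 0
    have hz : (0 :: pvG 0 0 s).countP (fun x => decide (x < thr)) = 0 := by
      apply List.countP_eq_zero.mpr
      intro x hx
      rcases List.mem_cons.mp hx with rfl | hx
      · simp only [decide_eq_true_eq, not_lt]; omega
      · have := pvG_ge s 0 0 x hx
        simp only [decide_eq_true_eq, not_lt]; omega
    rw [hz, pvF_nonpos thr s h0]
    simp
  · -- threshold positive: table count = 1 + (pvF thr s - 1)
    have h0' : 0 < thr := by omega
    have hg := pvG_count s 0 0 thr (le_refl 0) h0' (by omega)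
    rw [sub_zero] at hg
    have hc : (0 :: pvG 0 0 s).countP (fun x => decide (x < thr))
        = (pvG 0 0 s).countP (fun x => decide (x < thr)) + 1 := by
      rw [List.countP_cons]
      simp [h0']
    rw [hc]
    push_cast
    omega

-- ===== VERDICT (by name: the statement is the Claim_ definition above) =====
theorem minimum_members_for_bill_passage_spec : Claim_equal_minimum_members_for_bill_passage := by
  intro N P ballots _hdom hpre
  unfold Spec_minimum_members_for_bill_passage
  exact pvMain N P ballots hpre
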